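-- pv_equiv track=rewrite | github.com/RecoRecoNi/Algorithm-Study | Programmers/모음사전/jisu.py | solution
-- ===== SOURCE A (Python) =====
-- def solution(word: str) -> int:
--     """
--     dfs 로 먼저 자리 별 단어 하나 차이의 단어 개수를 파악 후, word가 사전 몇 번쨰 수인지 반환한다.
--     """
--     # -------------------------------------------------
--     """
--     모음 사전을 DFS로 생성 후, index 메서드로 단어 길이 별 A와 E의 길이를 얻기
--     """
--     # answers = []
--     # alpha = "AEIOU"
--
--     # def dfs(tmp):
--     #     if len(tmp) > 5:
--     #         return
--     #     if tmp:
--     #         answers.append(tmp)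
--
--     #     for idx in range(5):
--     #         dfs(tmp + alpha[idx])
--
--     # dfs("")
--     # answers.sort()
--
--     # return answers.index(word) + 1
--     # -------------------------------------------------
--
--     dict_cut = [781, 156, 31, 6, 1]  # 자리 수 별 알파벳 차이
--     dict_index = {ch: idx for ch, idx in zip("AEIOU", range(5))}
--
--     result = 0
--     for idx, w in enumerate(word):  # 몇 번째 단어인지 계산
--         result += dict_cut[idx] * dict_index[w] + 1  # 단어 순서는 1부터 시작함에 유의
--
--     return result
-- ===== SOURCE B (Python) =====
-- def solution(word: str) -> int:
--     # Materialize the vowel dictionary in lexicographic (DFS preorder) order,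
--     # with the empty string first, and return word's position in it.
--     words = [""]
--
--     def dfs(prefix):
--         if len(prefix) == 5:
--             return
--         for ch in "AEIOU":
--             words.append(prefix + ch)
--             dfs(prefix + ch)
--
--     dfs("")
--     return words.index(word)
-- ===== Notes on version B (the rewrite author's own statement) =====
-- stated objective: alternative
-- what changed: A computes the rank arithmetically from precomputed per-position place values; B materializes the whole vowel dictionary (empty string first) by DFS in lexicographic order and returns the word's list index.
import Mathlib
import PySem

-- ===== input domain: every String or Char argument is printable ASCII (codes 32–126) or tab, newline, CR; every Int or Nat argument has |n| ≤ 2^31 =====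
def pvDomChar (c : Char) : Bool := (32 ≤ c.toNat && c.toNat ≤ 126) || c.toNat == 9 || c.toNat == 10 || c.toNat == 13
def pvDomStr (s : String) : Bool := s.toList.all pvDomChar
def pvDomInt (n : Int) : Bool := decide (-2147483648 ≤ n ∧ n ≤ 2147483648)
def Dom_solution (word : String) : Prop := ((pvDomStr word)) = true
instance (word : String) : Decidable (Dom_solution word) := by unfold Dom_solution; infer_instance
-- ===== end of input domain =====

-- B replaces A's precomputed place-value arithmetic by materializing the whole
-- vowel dictionary (DFS preorder, empty string first) and returning word's index
-- in it; objective: alternative (A is O(len word), B enumerates 3906 words).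

-- ===== PORT A =====
-- A's place values per position
def dictCut : List Int := [781, 156, 31, 6, 1]
-- {ch: idx for ch, idx in zip("AEIOU", range(5))}
def dictIndex : PySem.Dict Char Int :=
  PySem.Dict.ofList (List.zip "AEIOU".toList (PySem.List.pyRange 0 5 1))

-- pyGet? = none is IndexError, get? = none is KeyError: both excluded by Pre_solution,
-- so the .getD 0 defaults are never read on admitted inputs.
def solution (word : String) : Int :=
  (PySem.List.enumerate word.toList 0).foldl
    (fun result p =>
      result + (PySem.List.pyGet? dictCut p.1).getD 0 * ((dictIndex.get? p.2).getD 0) + 1)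
    0

-- ===== PORT B =====
def vowelsB : List Char := "AEIOU".toList

-- Source B's dfs: for each vowel, append prefix+ch then recurse; fuel = 5 - len(prefix)
def dfsB : Nat → List Char → List (List Char)
  | 0, _ => []
  | d + 1, pre => vowelsB.flatMap (fun ch => (pre ++ [ch]) :: dfsB d (pre ++ [ch]))

-- words = [""] then dfs("");  .index = none is ValueError, excluded by Pre_solution
def solution_alt (word : String) : Int :=
  (((PySem.List.index? ([] :: dfsB 5 []) word.toList).getD 0 : Nat) : Int)

-- ===== PRECONDITION & SPEC =====
-- A raises KeyError on any non-vowel character and IndexError past position 4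
-- (B's .index raises ValueError on the same inputs): exactly those are excluded.
def Pre_solution (word : String) : Prop :=
  word.toList.length ≤ 5 ∧ word.toList.all (fun c => c ∈ vowelsB) = true
instance (word : String) : Decidable (Pre_solution word) := by unfold Pre_solution; infer_instance

def pvWitness_solution : String := "EU"

def Spec_solution (word : String) (out : Int) : Prop := out = solution_alt word
instance (word : String) (out : Int) : Decidable (Spec_solution word out) := by unfold Spec_solution; infer_instance

-- ===== CLAIM (what is proved, stated in full; the proofs are below) =====
def Claim_equal_solution : Prop := ∀ (word : String), Dom_solution word → Pre_solution word → Spec_solution word (solution word)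

-- ===== LEMMAS AND PROOFS =====

-- |dfsB d p| (independent of p)
def G : Nat → Nat
  | 0 => 0
  | d + 1 => 5 * (1 + G d)

def vidx (c : Char) : Nat := List.idxOf c vowelsB

-- 1-based rank of a nonempty word among words of length ≤ d sharing its prefix
def rank : Nat → List Char → Nat
  | _, [] => 0
  | d, c :: s => vidx c * (1 + G (d - 1)) + 1 + rank (d - 1) s

lemma vowelsB_eq : vowelsB = ['A', 'E', 'I', 'O', 'U'] := by decide

lemma len_dfsB : ∀ (d : Nat) (p : List Char), (dfsB d p).length = G d := by
  intro d
  induction d with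
  | zero => intro p; rfl
  | succ d ih =>
    intro p
    simp [dfsB, G, vowelsB_eq, List.flatMap, ih]
    ring

lemma shape_dfsB : ∀ (d : Nat) (p w : List Char), w ∈ dfsB d p → ∃ c t, w = p ++ c :: t := by
  intro d
  induction d with
  | zero => intro p w h; simp [dfsB] at h
  | succ d ih =>
    intro p w h
    simp only [dfsB, List.mem_flatMap, List.mem_cons] at h
    obtain ⟨ch, _, h | h⟩ := h
    · exact ⟨ch, [], by simp [h]⟩
    · obtain ⟨c', t', ht⟩ := ih (p ++ [ch]) w h
      exact ⟨ch, c' :: t', by simp [ht]⟩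

lemma not_mem_blk (d : Nat) (p : List Char) (c c' : Char) (s : List Char)
    (hne : c' ≠ c) : (p ++ c :: s) ∉ ((p ++ [c']) :: dfsB d (p ++ [c'])) := by
  intro h
  rcases List.mem_cons.1 h with h | h
  · have h2 : c :: s = [c'] := List.append_cancel_left h
    cases h2; exact hne rfl
  · obtain ⟨e, t, ht⟩ := shape_dfsB d (p ++ [c']) _ h
    rw [List.append_assoc] at ht
    have h2 : c :: s = c' :: e :: t := List.append_cancel_left ht
    cases h2; exact hne rfl

lemma index?_append_of_not_mem {α : Type} [BEq α] [LawfulBEq α]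
    (l1 l2 : List α) (v : α) (h : v ∉ l1) :
    PySem.List.index? (l1 ++ l2) v = (PySem.List.index? l2 v).map (· + l1.length) := by
  induction l1 with
  | nil => simp
  | cons x xs ih =>
    have hx : x ≠ v := fun e => h (e ▸ List.mem_cons_self)
    rw [List.cons_append, PySem.List.index?_cons_of_ne _ hx,
      ih (fun hv => h (List.mem_cons_of_mem _ hv)), Option.map_map]
    cases PySem.List.index? l2 v <;> simp

lemma index?_dfsB : ∀ (d : Nat) (p : List Char) (c : Char) (s : List Char),
    s.length < d → c ∈ vowelsB → (∀ x ∈ s, x ∈ vowelsB) →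
    PySem.List.index? (dfsB d p) (p ++ c :: s)
      = some (vidx c * (1 + G (d - 1)) + rank (d - 1) s) := by
  intro d
  induction d with
  | zero => intro p c s h _ _; omega
  | succ d ih =>
    intro p c s hlen hc hs
    -- inner induction over the vowel list: skip blocks before c's block
    have aux : ∀ (vs : List Char), c ∈ vs →
        PySem.List.index? (vs.flatMap (fun ch => (p ++ [ch]) :: dfsB d (p ++ [ch]))) (p ++ c :: s)
          = some (List.idxOf c vs * (1 + G d) + rank d s) := by
      intro vs
      induction vs with
      | nil => intro h; simp at h
      | cons v vs ihv =>
        intro hcv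
        rw [List.flatMap_cons]
        by_cases hvc : v = c
        · subst hvc
          cases s with
          | nil =>
            rw [List.cons_append, PySem.List.index?_cons_self]
            simp [rank]
          | cons c' s' =>
            have hne : p ++ [v] ≠ p ++ v :: c' :: s' := by
              intro h
              have := List.append_cancel_left h
              simp at this
            rw [List.cons_append, PySem.List.index?_cons_of_ne _ hne]
            have htgt : p ++ v :: c' :: s' = (p ++ [v]) ++ c' :: s' := by simp
            have hmemidx := ih (p ++ [v]) c' s' (by simp at hlen; omega)
              (hs c' (by simp)) (fun x hx => hs x (by simp [hx]))
            have hmem : ((p ++ [v]) ++ c' :: s') ∈ dfsB d (p ++ [v]) :=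
              (PySem.List.index?_isSome_iff _ _).1 (by rw [hmemidx]; rfl)
            rw [htgt, PySem.List.index?_append_of_mem _ hmem, hmemidx]
            simp [rank, List.idxOf_cons_self]
            omega
        · have hnm := not_mem_blk d p c v s hvc
          rw [index?_append_of_not_mem _ _ _ hnm,
            ihv ((List.mem_cons.1 hcv).resolve_left (fun h => hvc h.symm))]
          have hlb : ((p ++ [v]) :: dfsB d (p ++ [v])).length = 1 + G d := by
            simp [len_dfsB]; omega
          rw [hlb]
          simp [List.idxOf_cons_ne _ (by simpa using hvc)]
          ring_nf
    rw [show dfsB (d + 1) p = vowelsB.flatMap (fun ch => (p ++ [ch]) :: dfsB d (p ++ [ch])) from rfl,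
      aux vowelsB hc]
    rfl

lemma cutsAt (i : Nat) (h : i < 5) :
    (PySem.List.pyGet? dictCut (i : Int)).getD 0 = 1 + (G (4 - i) : Int) := by
  interval_cases i <;> decide

lemma dIdxAt (c : Char) (h : c ∈ vowelsB) :
    (dictIndex.get? c).getD 0 = (vidx c : Int) := by
  rw [vowelsB_eq] at h
  fin_cases h <;> decide

lemma foldA : ∀ (s : List Char) (i : Nat) (r : Int), i + s.length ≤ 5 →
    (∀ x ∈ s, x ∈ vowelsB) →
    (PySem.List.enumerate s (i : Int)).foldl
      (fun result p =>
        result + (PySem.List.pyGet? dictCut p.1).getD 0 * ((dictIndex.get? p.2).getD 0) + 1) r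
    = r + (rank (5 - i) s : Int) := by
  intro s
  induction s with
  | nil => intro i r _ _; simp [PySem.List.enumerate_nil, rank]
  | cons c s ih =>
    intro i r hle hmem
    have hi5 : i < 5 := by simp only [List.length_cons] at hle; omega
    have hih : i + 1 + s.length ≤ 5 := by simp only [List.length_cons] at hle; omega
    rw [PySem.List.enumerate_cons, List.foldl_cons]
    have hcast : (i : Int) + 1 = ((i + 1 : Nat) : Int) := by push_cast; ring
    rw [hcast, ih (i + 1) _ hih (fun x hx => hmem x (by simp [hx]))]
    rw [cutsAt i hi5, dIdxAt c (hmem c (by simp))]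
    have h5 : 5 - i = (4 - i) + 1 := by omega
    have h5' : 5 - (i + 1) = 4 - i := by omega
    rw [h5, h5', show rank ((4 - i) + 1) (c :: s) = vidx c * (1 + G ((4 - i + 1) - 1)) + 1 + rank ((4 - i + 1) - 1) s from rfl]
    simp only [Nat.add_sub_cancel]
    push_cast
    ring

-- ===== VERDICT (by name: the statement is the Claim_ definition above) =====
theorem solution_spec : Claim_equal_solution := by
  intro word _ hpre
  obtain ⟨hlen, hmem⟩ := hpre
  simp only [List.all_eq_true, decide_eq_true_eq] at hmem
  unfold Spec_solution solution solution_alt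
  cases hw : word.toList with
  | nil => simp [PySem.List.enumerate_nil]
  | cons c s =>
    rw [hw] at hlen hmem
    have hne : ([] : List Char) ≠ c :: s := by simp
    have h0 : PySem.List.enumerate (c :: s) (0 : Int) = PySem.List.enumerate (c :: s) ((0 : Nat) : Int) := by norm_num
    rw [h0, foldA (c :: s) 0 0 (by omega) hmem]
    rw [PySem.List.index?_cons_of_ne _ hne,
      show c :: s = [] ++ c :: s from rfl,
      index?_dfsB 5 [] c s (by simp at hlen ⊢; omega) (hmem c (by simp))
        (fun x hx => hmem x (by simp [hx]))]
    simp [rank]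
    ring
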